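-- pv_equiv track=rewrite | github.com/Schnouki/advent-of-code | 2019/day17.py | find_scaffolds
-- ===== SOURCE A (Python) =====
-- from typing import List, Tuple
--
-- def find_scaffolds(outputs: List[int]):
--     """Iterate over the scaffolds positions.
--
--     >>> len(list(find_scaffolds(ord(c) for c in TEST_MAP)))
--     32
--     """
--     x, y = 0, 0
--     for n in outputs:
--         if n == 10:
--             x, y = 0, y + 1
--             continue
--         if n in (35, 94):
--             yield (x, y, n)
--         x += 1
-- ===== SOURCE B (Python) =====
-- from typing import List, Tuple
--
-- def find_scaffolds(outputs: List[int]):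
--     # Build the grid first: split the stream on newline codes (10) into rows,
--     # then scan the rows with a nested enumerate.
--     rows = []
--     cur = []
--     for n in outputs:
--         if n == 10:
--             rows.append(cur)
--             cur = []
--         else:
--             cur.append(n)
--     rows.append(cur)
--     return [(x, y, n)
--             for y, row in enumerate(rows)
--             for x, n in enumerate(row)
--             if n in (35, 94)]
-- ===== Notes on version B (the rewrite author's own statement) =====
-- stated objective: alternative
-- what changed: B materializes the stream into rows by splitting on newline codes and then yields hits with a nested enumerate scan, instead of A's single pass with manually tracked x,y cursor state.
import Mathlib
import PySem

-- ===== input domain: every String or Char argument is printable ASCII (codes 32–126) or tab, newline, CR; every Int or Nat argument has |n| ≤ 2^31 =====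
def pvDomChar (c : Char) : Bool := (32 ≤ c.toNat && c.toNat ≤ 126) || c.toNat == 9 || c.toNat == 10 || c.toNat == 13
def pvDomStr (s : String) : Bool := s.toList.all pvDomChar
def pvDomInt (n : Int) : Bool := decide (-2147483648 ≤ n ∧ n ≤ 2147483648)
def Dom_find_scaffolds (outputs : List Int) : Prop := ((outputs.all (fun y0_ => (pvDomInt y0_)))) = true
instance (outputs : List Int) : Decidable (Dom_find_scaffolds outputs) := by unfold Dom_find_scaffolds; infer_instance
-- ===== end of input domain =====

-- B builds the grid (split on newline codes) and scans it with a nested enumerate,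
-- replacing A's manually tracked x,y cursor; objective: alternative decomposition.
-- (A is a generator; the equivalence is about the list of yielded values.)


-- ===== PORT A =====
-- single pass over the stream, carrying the cursor (x, y) and the yielded list
def find_scaffolds (outputs : List Int) : List (Int × Int × Int) :=
  (outputs.foldl
    (fun (s : Int × Int × List (Int × Int × Int)) n =>
      let x := s.1; let y := s.2.1; let acc := s.2.2
      if n = 10 then (0, y + 1, acc)
      else if n = 35 ∨ n = 94 then (x + 1, y, acc ++ [(x, y, n)])
      else (x + 1, y, acc))
    (0, 0, [])).2.2

-- ===== PORT B =====
-- Source B: split the stream on 10 into rows (fold with (rows, cur)), append the last row,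
-- then the nested-enumerate comprehension
def find_scaffolds_alt (outputs : List Int) : List (Int × Int × Int) :=
  let p := outputs.foldl
    (fun (s : List (List Int) × List Int) n =>
      if n = 10 then (s.1 ++ [s.2], []) else (s.1, s.2 ++ [n]))
    ([], [])
  let rows := p.1 ++ [p.2]
  (PySem.List.enumerate rows).flatMap (fun yr =>
    (PySem.List.enumerate yr.2).filterMap (fun xn =>
      if xn.2 = 35 ∨ xn.2 = 94 then some (xn.1, yr.1, xn.2) else none))

-- ===== PRECONDITION & SPEC =====
def Spec_find_scaffolds (outputs : List Int) (out : List (Int × Int × Int)) : Prop := out = find_scaffolds_alt outputs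
instance (outputs : List Int) (out : List (Int × Int × Int)) : Decidable (Spec_find_scaffolds outputs out) := by unfold Spec_find_scaffolds; infer_instance

-- ===== CLAIM (what is proved, stated in full; the proofs are below) =====
def Claim_equal_find_scaffolds : Prop := ∀ (outputs : List Int), Dom_find_scaffolds outputs → Spec_find_scaffolds outputs (find_scaffolds outputs)

-- ===== LEMMAS AND PROOFS =====

-- reference recursion: A's loop as a structural recursion on the stream
def pvGo (x y : Int) : List Int → List (Int × Int × Int)
  | [] => []
  | n :: rest =>
    if n = 10 then pvGo 0 (y + 1) rest
    else if n = 35 ∨ n = 94 then (x, y, n) :: pvGo (x + 1) y rest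
    else pvGo (x + 1) y rest

-- structural splitting of the stream on 10 (always nonempty)
def pvSplit : List Int → List (List Int)
  | [] => [[]]
  | n :: rest =>
    if n = 10 then [] :: pvSplit rest
    else
      match pvSplit rest with
      | [] => [[n]]
      | r :: rs => (n :: r) :: rs

-- scanning one row / a list of rows, with explicit starting coordinates
def pvRow (x y : Int) : List Int → List (Int × Int × Int)
  | [] => []
  | n :: r =>
    if n = 35 ∨ n = 94 then (x, y, n) :: pvRow (x + 1) y r
    else pvRow (x + 1) y r

def pvRows (y : Int) : List (List Int) → List (Int × Int × Int)
  | [] => []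
  | r :: rs => pvRow 0 y r ++ pvRows (y + 1) rs

theorem pvSplit_ne_nil (l : List Int) : pvSplit l ≠ [] := by
  cases l with
  | nil => simp [pvSplit]
  | cons n rest =>
    simp only [pvSplit]
    split
    · simp
    · cases h : pvSplit rest <;> simp

-- A's fold with arbitrary state equals pvGo appended to the accumulator
theorem pvA_fold (l : List Int) : ∀ (x y : Int) (acc : List (Int × Int × Int)),
    (l.foldl
      (fun (s : Int × Int × List (Int × Int × Int)) n =>
        let x := s.1; let y := s.2.1; let acc := s.2.2
        if n = 10 then (0, y + 1, acc)
        else if n = 35 ∨ n = 94 then (x + 1, y, acc ++ [(x, y, n)])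
        else (x + 1, y, acc))
      (x, y, acc)).2.2 = acc ++ pvGo x y l := by
  induction l with
  | nil => intro x y acc; simp [pvGo]
  | cons n rest ih =>
    intro x y acc
    simp only [List.foldl_cons, pvGo]
    by_cases h10 : n = 10
    · simp [h10, ih]
    · by_cases hk : n = 35 ∨ n = 94
      · simp [h10, hk, ih]
      · simp [h10, hk, ih]

theorem find_scaffolds_eq_go (l : List Int) : find_scaffolds l = pvGo 0 0 l := by
  simpa [find_scaffolds] using pvA_fold l 0 0 []

-- B's row-splitting fold produces pvSplit (head row prefixed with the pending cur)
theorem pvB_fold (l : List Int) : ∀ (rows : List (List Int)) (cur : List Int),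
    (let p := l.foldl
        (fun (s : List (List Int) × List Int) n =>
          if n = 10 then (s.1 ++ [s.2], []) else (s.1, s.2 ++ [n]))
        (rows, cur)
     p.1 ++ [p.2]) = rows ++ (pvSplit l).modifyHead (fun r => cur ++ r) := by
  induction l with
  | nil => intro rows cur; simp [pvSplit]
  | cons n rest ih =>
    intro rows cur
    simp only [List.foldl_cons]
    by_cases h10 : n = 10
    · simp only [h10, pvSplit, ih]
      cases pvSplit rest <;> simp
    · simp only [if_neg h10, pvSplit, ih]
      cases h : pvSplit rest with
      | nil => exact absurd h (pvSplit_ne_nil rest)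
      | cons r rs => simp

-- go equals row-scan of the split, for any starting coordinates
theorem pvGo_eq_rows (l : List Int) : ∀ (x y : Int),
    pvGo x y l =
      pvRow x y ((pvSplit l).headI) ++ pvRows (y + 1) ((pvSplit l).tail) := by
  induction l with
  | nil => intro x y; simp [pvGo, pvSplit, pvRow, pvRows]
  | cons n rest ih =>
    intro x y
    by_cases h10 : n = 10
    · simp only [pvGo, h10, pvSplit]
      cases h : pvSplit rest with
      | nil => exact absurd h (pvSplit_ne_nil rest)
      | cons r rs => simp [pvRow, pvRows, ih, h]
    · simp only [pvGo, pvSplit, if_neg h10]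
      cases h : pvSplit rest with
      | nil => exact absurd h (pvSplit_ne_nil rest)
      | cons r rs =>
        by_cases hk : n = 35 ∨ n = 94
        · simp [hk, pvRow, ih, h]
        · simp [hk, pvRow, ih, h]

-- the enumerate comprehension over one row equals pvRow (any start index)
theorem pvEnum_row (r : List Int) : ∀ (x y : Int),
    (PySem.List.enumerate r x).filterMap (fun xn =>
      if xn.2 = 35 ∨ xn.2 = 94 then some (xn.1, y, xn.2) else none) = pvRow x y r := by
  induction r with
  | nil => intro x y; simp [pvRow]
  | cons n rest ih =>
    intro x y
    rw [PySem.List.enumerate_cons]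
    by_cases hk : n = 35 ∨ n = 94
    · simp [pvRow, hk, ih]
    · simp [pvRow, hk, ih]

-- the nested enumerate comprehension equals pvRows (any starting row index)
theorem pvEnum_rows (rows : List (List Int)) : ∀ (y : Int),
    (PySem.List.enumerate rows y).flatMap (fun yr =>
      (PySem.List.enumerate yr.2).filterMap (fun xn =>
        if xn.2 = 35 ∨ xn.2 = 94 then some (xn.1, yr.1, xn.2) else none)) =
    pvRows y rows := by
  induction rows with
  | nil => intro y; simp [pvRows]
  | cons r rs ih =>
    intro y
    rw [PySem.List.enumerate_cons]
    simp only [List.flatMap_cons, pvRows, ih]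
    rw [pvEnum_row r 0 y]

theorem find_scaffolds_alt_eq_rows (l : List Int) :
    find_scaffolds_alt l = pvRows 0 (pvSplit l) := by
  have hb := pvB_fold l [] []
  simp only [List.nil_append] at hb
  have hmod : (pvSplit l).modifyHead (fun r => r) = pvSplit l := by
    cases pvSplit l <;> simp
  rw [hmod] at hb
  simp only [find_scaffolds_alt, hb]
  exact pvEnum_rows (pvSplit l) 0

-- ===== VERDICT (by name: the statement is the Claim_ definition above) =====
theorem find_scaffolds_spec : Claim_equal_find_scaffolds := by
  intro outputs _
  unfold Spec_find_scaffolds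
  rw [find_scaffolds_eq_go, find_scaffolds_alt_eq_rows, pvGo_eq_rows]
  cases h : pvSplit outputs with
  | nil => exact absurd h (pvSplit_ne_nil outputs)
  | cons r rs => simp [pvRows]
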